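-- pv_equiv track=rewrite | github.com/data-IA-2023/vocal_weather_north_scorers | app/testgeo.py | localisation_func
-- ===== SOURCE A (Python) =====
-- def localisation_func(a,b):
--     a=a.lower()
--     a=virgule(a)
--     a=a.split(' ')
--     b=underscore(b)
--     c=[]
--     for i in range(len(a)):
--         if a[i] in b:
--             if i!=0 and a[i-1] in b:
--                 c[-1]=c[-1]+' '+a[i]
--             else:
--                 c.append(a[i])
--     return c
--
-- def virgule(a):
--     b=""
--     a = a.lower().replace('\xa0', '')
--     for carac in a:
--         if carac==',' or carac== ';' or carac== '.' or carac== '?' or carac== '!':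
--             b+=' , '
--         else:
--             b+=carac
--     return b
--
-- def underscore(a):
--     a=' '.join(a)
--     b=''
--     for carac in a:
--         if carac=='▁':
--             b+=''
--         else:
--             b+=carac
--     b=b.lower()
--     b=b.split(' ')
--     return b
-- ===== SOURCE B (Python) =====
-- def localisation_func(a, b):
--     ref = underscore(b)
--
--     def span_in(toks):
--         # longest prefix of toks inside ref, and the remainder
--         if toks and toks[0] in ref:
--             run, rest = span_in(toks[1:])
--             return [toks[0]] + run, rest
--         return [], toks
--
--     def runs(toks):
--         # recursive run-segmentation: skip out-of-ref tokens, peel off one maximal run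
--         if not toks:
--             return []
--         t, ts = toks[0], toks[1:]
--         if t in ref:
--             run, rest = span_in(ts)
--             return [' '.join([t] + run)] + runs(rest)
--         return runs(ts)
--
--     return runs(virgule(a.lower()).split(' '))
--
-- def virgule(a):
--     b=""
--     a = a.lower().replace('\xa0', '')
--     for carac in a:
--         if carac==',' or carac== ';' or carac== '.' or carac== '?' or carac== '!':
--             b+=' , '
--         else:
--             b+=carac
--     return b
--
-- def underscore(a):
--     a=' '.join(a)
--     b=''
--     for carac in a:
--         if carac=='▁':
--             b+=''
--         else:
--             b+=carac
--     b=b.lower()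
--     b=b.split(' ')
--     return b
-- ===== Notes on version B (the rewrite author's own statement) =====
-- stated objective: alternative
-- what changed: A's single indexed loop with i-1 look-back and in-place mutation of c[-1] is replaced by recursive run-segmentation: a span helper peels off the maximal prefix of in-reference tokens and the main recursion skips out-of-reference tokens and emits one joined run per maximal segment.
import Mathlib
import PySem

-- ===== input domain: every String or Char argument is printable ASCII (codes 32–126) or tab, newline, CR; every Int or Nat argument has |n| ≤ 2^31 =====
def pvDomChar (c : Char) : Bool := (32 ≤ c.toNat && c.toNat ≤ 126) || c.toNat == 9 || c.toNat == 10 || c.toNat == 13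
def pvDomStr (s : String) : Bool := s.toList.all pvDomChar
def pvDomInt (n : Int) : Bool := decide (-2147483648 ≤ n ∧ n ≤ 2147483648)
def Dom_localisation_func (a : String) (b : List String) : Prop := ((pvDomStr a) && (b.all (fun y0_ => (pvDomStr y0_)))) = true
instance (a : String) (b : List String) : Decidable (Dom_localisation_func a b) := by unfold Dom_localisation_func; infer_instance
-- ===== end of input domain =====

-- B keeps the helpers and replaces A's i-1 look-back loop with recursive run-segmentation
-- (span off the maximal in-reference prefix, recurse on the rest); objective: alternative.

-- ===== PORT A =====
-- s.split(' ') with the literal one-char separator; exact: Chars.splitOn is Python's split for a nonempty separator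
def pySplitSpace (s : String) : List String := (PySem.Chars.splitOn s.toList [' ']).map String.ofList

-- helper virgule (shared by both ports, as in both Python files)
def virgule (a : String) : String :=
  let a := PySem.Str.replace (PySem.Str.lower a) "\u00a0" ""
  String.ofList (a.toList.foldl (fun b c =>
    if c = ',' ∨ c = ';' ∨ c = '.' ∨ c = '?' ∨ c = '!' then b ++ " , ".toList else b ++ [c]) [])

-- helper underscore (shared by both ports, as in both Python files)
def underscore (a : List String) : List String :=
  let s := PySem.Str.join " " a
  let b := String.ofList (s.toList.foldl (fun b c => if c = '▁' then b else b ++ [c]) [])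
  pySplitSpace (PySem.Str.lower b)

def localisation_func (a : String) (b : List String) : List String :=
  let a1 := PySem.Str.lower a
  let a2 := virgule a1
  let toks := pySplitSpace a2
  let bs := underscore b
  (List.range toks.length).foldl (fun c i =>
    if toks.getD i "" ∈ bs then
      if i ≠ 0 ∧ toks.getD (i - 1) "" ∈ bs then
        c.dropLast ++ [c.getLastD "" ++ " " ++ toks.getD i ""]
      else c ++ [toks.getD i ""]
    else c) []

-- ===== PORT B =====
-- span_in of Source B: longest prefix of toks inside ref, plus the remainder
def spanIn (ref : List String) : List String → List String × List String
  | [] => ([], [])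
  | t :: ts =>
    if t ∈ ref then
      let p := spanIn ref ts
      (t :: p.1, p.2)
    else ([], t :: ts)

theorem spanIn_snd_length (ref : List String) (ts : List String) :
    (spanIn ref ts).2.length ≤ ts.length := by
  induction ts with
  | nil => simp [spanIn]
  | cons t ts ih => by_cases h : t ∈ ref <;> simp [spanIn, h] <;> omega

-- runs of Source B
def runsB (ref : List String) : List String → List String
  | [] => []
  | t :: ts =>
    if t ∈ ref then
      let p := spanIn ref ts
      PySem.Str.join " " (t :: p.1) :: runsB ref p.2
    else runsB ref ts
termination_by toks => toks.length
decreasing_by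
  · have := spanIn_snd_length ref ts; simp; omega
  · simp

def localisation_func_alt (a : String) (b : List String) : List String :=
  let ref := underscore b
  runsB ref (pySplitSpace (virgule (PySem.Str.lower a)))

-- ===== PRECONDITION & SPEC =====
def Spec_localisation_func (a : String) (b : List String) (out : List String) : Prop := out = localisation_func_alt a b
instance (a : String) (b : List String) (out : List String) : Decidable (Spec_localisation_func a b out) := by unfold Spec_localisation_func; infer_instance

-- ===== CLAIM (what is proved, stated in full; the proofs are below) =====
def Claim_equal_localisation_func : Prop := ∀ (a : String) (b : List String), Dom_localisation_func a b → Spec_localisation_func a b (localisation_func a b)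

-- ===== LEMMAS AND PROOFS =====

theorem chars_join_snoc (c x : List Char) (l : List (List Char)) (h : l ≠ []) :
    PySem.Chars.join c (l ++ [x]) = PySem.Chars.join c l ++ c ++ x := by
  induction l with
  | nil => simp at h
  | cons a t ih =>
    cases t with
    | nil => simp [pysem]
    | cons b t2 => simp [PySem.Chars.join_cons_cons] at *; simp [ih]

theorem join_space_snoc (run : List String) (t : String) (h : run ≠ []) :
    PySem.Str.join " " (run ++ [t]) = PySem.Str.join " " run ++ " " ++ t := by
  apply String.toList_inj.mp
  have hm : run.map String.toList ≠ [] := by simpa using h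
  simp only [PySem.Str.toList_join, List.map_append, List.map_cons, List.map_nil,
    String.toList_append, chars_join_snoc _ _ _ hm]

theorem join_space_singleton (t : String) : PySem.Str.join " " [t] = t := by
  apply String.toList_inj.mp
  simp only [PySem.Str.toList_join, List.map_cons, List.map_nil, PySem.Chars.join_singleton]

-- the run-accumulator fold used as a bridge between A's indexed loop and B's recursion
def stepAcc (bs : List String) (st : List String × List String) (t : String) : List String × List String :=
  if t ∈ bs then (st.1, st.2 ++ [t])
  else if st.2 ≠ [] then (st.1 ++ [PySem.Str.join " " st.2], [])
  else st

def flushAcc (st : List String × List String) : List String :=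
  if st.2 ≠ [] then st.1 ++ [PySem.Str.join " " st.2] else st.1

-- A's indexed look-back loop equals the run-accumulator fold, plus the invariant that the
-- current run is nonempty exactly when the last token seen is in bs
theorem loop_aux (bs : List String) (toks : List String) :
    ((List.range toks.length).foldl (fun c i =>
      if toks.getD i "" ∈ bs then
        if i ≠ 0 ∧ toks.getD (i - 1) "" ∈ bs then
          c.dropLast ++ [c.getLastD "" ++ " " ++ toks.getD i ""]
        else c ++ [toks.getD i ""]
      else c) []
      = flushAcc (toks.foldl (stepAcc bs) ([], [])))
    ∧ ((toks.foldl (stepAcc bs) ([], [])).2 = [] ↔ (∀ u, toks.getLast? = some u → u ∉ bs)) := by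
  induction toks using List.reverseRecOn with
  | nil => simp [flushAcc]
  | append_singleton ts t ih =>
    obtain ⟨ihEq, ihFlag⟩ := ih
    set s := ts.foldl (stepAcc bs) ([], []) with hs
    have hfoldB : (ts ++ [t]).foldl (stepAcc bs) ([], []) = stepAcc bs s t := by
      rw [List.foldl_append]; rfl
    -- the first ts.length steps of A do not look at the appended token
    have hcongr : (List.range ts.length).foldl (fun c i =>
        if (ts ++ [t]).getD i "" ∈ bs then
          if i ≠ 0 ∧ (ts ++ [t]).getD (i - 1) "" ∈ bs then
            c.dropLast ++ [c.getLastD "" ++ " " ++ (ts ++ [t]).getD i ""]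
          else c ++ [(ts ++ [t]).getD i ""]
        else c) []
        = (List.range ts.length).foldl (fun c i =>
        if ts.getD i "" ∈ bs then
          if i ≠ 0 ∧ ts.getD (i - 1) "" ∈ bs then
            c.dropLast ++ [c.getLastD "" ++ " " ++ ts.getD i ""]
          else c ++ [ts.getD i ""]
        else c) [] := by
      apply PySem.List.foldl_congr_mem
      intro acc i hi
      have hi' : i < ts.length := by simpa using hi
      have h1 : (ts ++ [t]).getD i "" = ts.getD i "" := by
        simp [List.getD, List.getElem?_append_left hi']
      have h2 : (ts ++ [t]).getD (i - 1) "" = ts.getD (i - 1) "" := by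
        simp [List.getD, List.getElem?_append_left (by omega : i - 1 < ts.length)]
      rw [h1, h2]
    have hlast : (ts ++ [t]).getD ts.length "" = t := by simp [List.getD]
    constructor
    · -- equality of the two results
      rw [List.length_append, List.length_singleton, List.range_succ, List.foldl_append,
        hcongr, ihEq, hfoldB]
      by_cases hb : t ∈ bs
      · by_cases hrun : s.2 = []
        · -- start a new run
          have hcond : ¬ (ts.length ≠ 0 ∧ (ts ++ [t]).getD (ts.length - 1) "" ∈ bs) := by
            rcases List.eq_nil_or_concat ts with h0 | ⟨us, u, rfl⟩
            · simp [h0]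
            · simp only [List.concat_eq_append] at *
              have hu : u ∉ bs := (ihFlag.mp hrun) u List.getLast?_concat
              have hgd : (us ++ [u] ++ [t]).getD ((us ++ [u]).length - 1) "" = u := by
                have hlt : (us ++ [u]).length - 1 < (us ++ [u]).length := by simp
                rw [List.getD, List.getElem?_append_left hlt]
                simp
              simp [hu]
          simp only [List.foldl_cons, List.foldl_nil, hlast, hb, hcond, if_pos, stepAcc, flushAcc]
          simp [hrun, join_space_singleton]
        · -- extend the current run: A mutates c[-1], the fold appends to the run
          have hnz : ts ≠ [] := by
            intro h0; apply hrun; subst h0; simp [hs]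
          obtain ⟨u, hu⟩ : ∃ u, ts.getLast? = some u :=
            Option.ne_none_iff_exists'.mp (by simpa using hnz)
          have hub : u ∈ bs := by
            by_contra hub
            exact hrun (ihFlag.mpr (by intro v hv; rw [hu] at hv; cases hv; exact hub))
          have hcond : ts.length ≠ 0 ∧ (ts ++ [t]).getD (ts.length - 1) "" ∈ bs := by
            refine ⟨by simpa using hnz, ?_⟩
            have : (ts ++ [t]).getD (ts.length - 1) "" = u := by
              have hlt : ts.length - 1 < ts.length := by
                have := List.length_pos_iff.mpr hnz; omega
              rw [List.getD, List.getElem?_append_left hlt]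
              rw [List.getLast?_eq_getElem?] at hu
              simp [hu]
            rw [this]; exact hub
          simp only [List.foldl_cons, List.foldl_nil, hlast, stepAcc, flushAcc]
          rw [if_pos hb, if_pos hcond]
          simp [hb, hrun, join_space_snoc s.2 t hrun]
      · -- token not in bs: A leaves c alone, the fold flushes the run
        simp only [List.foldl_cons, List.foldl_nil, hlast, hb, if_false, stepAcc, flushAcc]
        by_cases hrun : s.2 = [] <;> simp [hrun]
    · -- the flag invariant for ts ++ [t]
      rw [hfoldB, List.getLast?_concat]
      by_cases hb : t ∈ bs
      · simp [stepAcc, hb]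
      · by_cases hrun : s.2 = [] <;> simp [stepAcc, hb, hrun]

-- the run-accumulator fold equals B's recursive run-segmentation
theorem acc_eq_runs (bs : List String) (toks : List String) :
    (∀ acc, flushAcc (toks.foldl (stepAcc bs) (acc, [])) = acc ++ runsB bs toks)
    ∧ (∀ acc run, run ≠ [] → flushAcc (toks.foldl (stepAcc bs) (acc, run))
        = acc ++ (PySem.Str.join " " (run ++ (spanIn bs toks).1) :: runsB bs (spanIn bs toks).2)) := by
  induction toks with
  | nil =>
    constructor
    · intro acc; simp [flushAcc, runsB]
    · intro acc run h; simp [flushAcc, spanIn, runsB, h]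
  | cons t ts ih =>
    obtain ⟨ih1, ih2⟩ := ih
    constructor
    · intro acc
      by_cases hb : t ∈ bs
      · have := ih2 acc [t] (by simp)
        simp only [List.foldl_cons, stepAcc, hb, if_pos, List.nil_append] at this ⊢
        simp only [this, runsB, hb, if_pos]
        simp
      · simp only [List.foldl_cons, stepAcc, hb, if_false, runsB]
        simpa using ih1 acc
    · intro acc run hrun
      by_cases hb : t ∈ bs
      · have := ih2 acc (run ++ [t]) (by simp)
        simp only [List.foldl_cons, stepAcc, hb, if_pos] at this ⊢
        simp only [this, spanIn, hb, if_pos]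
        simp
      · simp only [List.foldl_cons, stepAcc, hb, if_false, spanIn, runsB]
        rw [if_pos hrun]
        simpa using ih1 (acc ++ [PySem.Str.join " " run])

-- ===== VERDICT (by name: the statement is the Claim_ definition above) =====
theorem localisation_func_spec : Claim_equal_localisation_func := by
  intro a b _
  unfold Spec_localisation_func localisation_func localisation_func_alt
  rw [(loop_aux _ _).1]
  exact (acc_eq_runs _ _).1 []
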